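-- pv_equiv track=rewrite | github.com/witoldzol/leetcode | maxsubarray.py | middle_to_end
-- ===== SOURCE A (Python) =====
-- from typing import List, Tuple
--
-- def middle_to_end(nums: List[int], start: int, end: int) -> int:
--     if start == end:
--         return nums[start]
--     current_sum = 0
--     maximum = nums[start]
--     for x in range(start, end):
--         current_sum += nums[x]
--         if current_sum > maximum:
--             maximum = current_sum
--     return maximum
-- ===== SOURCE B (Python) =====
-- def middle_to_end(nums, start, end):
--     # Backward scan using the suffix recurrence S(i) = nums[i] + max(0, S(i+1)),
--     # where S(i) is the maximum prefix sum of nums[i:end]; empty range falls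
--     # back to nums[start].
--     if start >= end:
--         return nums[start]
--     s = nums[end - 1]
--     for i in reversed(range(start, end - 1)):
--         s = nums[i] + max(0, s)
--     return s
-- ===== Notes on version B (the rewrite author's own statement) =====
-- stated objective: alternative
-- what changed: B replaces A's forward pass maintaining a running sum plus a running maximum by a backward scan of the window with a single accumulator driven by the suffix recurrence S(i) = nums[i] + max(0, S(i+1)), whose value at start is the maximum prefix sum.
import Mathlib
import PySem

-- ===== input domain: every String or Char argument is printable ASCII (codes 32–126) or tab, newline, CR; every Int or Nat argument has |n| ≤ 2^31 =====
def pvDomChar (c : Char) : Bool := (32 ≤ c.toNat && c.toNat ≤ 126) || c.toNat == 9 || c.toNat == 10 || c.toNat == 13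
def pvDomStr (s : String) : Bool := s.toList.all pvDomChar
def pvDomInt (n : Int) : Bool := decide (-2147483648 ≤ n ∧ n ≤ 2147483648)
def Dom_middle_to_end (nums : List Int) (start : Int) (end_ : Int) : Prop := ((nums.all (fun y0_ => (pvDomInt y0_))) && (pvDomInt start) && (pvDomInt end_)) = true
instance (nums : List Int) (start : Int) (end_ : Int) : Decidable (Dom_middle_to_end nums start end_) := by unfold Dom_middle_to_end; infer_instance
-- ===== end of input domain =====

-- B replaces A's forward running-sum/running-max loop by a backward scan with the
-- suffix recurrence S(i) = nums[i] + max(0, S(i+1)) (alternative decomposition).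

-- ===== PORT A =====
def middle_to_end (nums : List Int) (start : Int) (end_ : Int) : Int :=
  if start = end_ then (PySem.List.pyGet? nums start).getD 0
  else
    ((PySem.List.pyRange start end_ 1).foldl
      (fun (st : Int × Int) x =>
        (st.1 + (PySem.List.pyGet? nums x).getD 0,
         if st.1 + (PySem.List.pyGet? nums x).getD 0 > st.2
         then st.1 + (PySem.List.pyGet? nums x).getD 0 else st.2))
      (0, (PySem.List.pyGet? nums start).getD 0)).2

-- ===== PORT B =====
def middle_to_end_alt (nums : List Int) (start : Int) (end_ : Int) : Int :=
  if start ≥ end_ then (PySem.List.pyGet? nums start).getD 0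
  else
    ((PySem.List.pyRange start (end_ - 1) 1).reverse).foldl
      (fun s i => (PySem.List.pyGet? nums i).getD 0 + max 0 s)
      ((PySem.List.pyGet? nums (end_ - 1)).getD 0)

-- ===== PRECONDITION & SPEC =====
-- Pre_ excludes exactly the inputs on which A raises IndexError: start outside
-- Python's index range for nums, or (when start < end_) an index in range(start, end_)
-- past the end of the list.
def Pre_middle_to_end (nums : List Int) (start : Int) (end_ : Int) : Prop :=
  PySem.Raise.InRange nums.length start ∧ (start < end_ → end_ ≤ (nums.length : Int))
instance (nums : List Int) (start : Int) (end_ : Int) : Decidable (Pre_middle_to_end nums start end_) := by unfold Pre_middle_to_end; infer_instance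

def pvWitness_middle_to_end : List Int × Int × Int := ([3, -1, 2, -5, 4], 1, 4)

def Spec_middle_to_end (nums : List Int) (start : Int) (end_ : Int) (out : Int) : Prop := out = middle_to_end_alt nums start end_
instance (nums : List Int) (start : Int) (end_ : Int) (out : Int) : Decidable (Spec_middle_to_end nums start end_ out) := by unfold Spec_middle_to_end; infer_instance

-- ===== CLAIM (what is proved, stated in full; the proofs are below) =====
def Claim_equal_middle_to_end : Prop := ∀ (nums : List Int) (start : Int) (end_ : Int), Dom_middle_to_end nums start end_ → Pre_middle_to_end nums start end_ → Spec_middle_to_end nums start end_ (middle_to_end nums start end_)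

-- ===== LEMMAS AND PROOFS =====

-- common reference value: S fuel i = maximum prefix sum of nums[i:end_] (fuel ≥ end_-i)
def pvS (nums : List Int) (end_ : Int) : Nat → Int → Int
  | 0, i => (PySem.List.pyGet? nums i).getD 0
  | f + 1, i =>
      if i + 1 = end_ then (PySem.List.pyGet? nums i).getD 0
      else (PySem.List.pyGet? nums i).getD 0 + max 0 (pvS nums end_ f (i + 1))

lemma foldA_eq_pvS (nums : List Int) (end_ : Int) :
    ∀ (fuel : Nat) (i s m : Int), i < end_ → (end_ - i).toNat ≤ fuel →
    ((PySem.List.pyRange i end_ 1).foldl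
      (fun (st : Int × Int) x =>
        (st.1 + (PySem.List.pyGet? nums x).getD 0,
         if st.1 + (PySem.List.pyGet? nums x).getD 0 > st.2
         then st.1 + (PySem.List.pyGet? nums x).getD 0 else st.2))
      (s, m)).2 = max m (s + pvS nums end_ fuel i) := by
  intro fuel
  induction fuel with
  | zero => intro i s m hi hf; omega
  | succ f ih =>
    intro i s m hi hf
    rw [PySem.List.pyRange_one_cons hi]
    by_cases he : i + 1 = end_
    · rw [PySem.List.pyRange_one_eq_nil (by omega : end_ ≤ i + 1)] at *
      simp only [List.foldl_cons, List.foldl_nil, pvS, if_pos he]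
      split_ifs with h <;> omega
    · have hi1 : i + 1 < end_ := by omega
      simp only [List.foldl_cons]
      rw [ih (i + 1) _ _ hi1 (by omega)]
      simp only [pvS, if_neg he]
      split_ifs with h <;> omega

lemma foldB_eq_pvS (nums : List Int) (end_ : Int) :
    ∀ (fuel : Nat) (i : Int), i < end_ → (end_ - i).toNat ≤ fuel →
    (PySem.List.pyRange i (end_ - 1) 1).foldr
      (fun j acc => (PySem.List.pyGet? nums j).getD 0 + max 0 acc)
      ((PySem.List.pyGet? nums (end_ - 1)).getD 0) = pvS nums end_ fuel i := by
  intro fuel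
  induction fuel with
  | zero => intro i hi hf; omega
  | succ f ih =>
    intro i hi hf
    by_cases he : i + 1 = end_
    · rw [PySem.List.pyRange_one_eq_nil (by omega : end_ - 1 ≤ i)]
      have h9 : end_ - 1 = i := by omega
      simp only [List.foldr_nil, pvS, if_pos he, h9]
    · have hi1 : i < end_ - 1 := by omega
      rw [PySem.List.pyRange_one_cons hi1]
      simp only [List.foldr_cons, pvS, if_neg he]
      rw [ih (i + 1) (by omega) (by omega)]

lemma pvS_ge_head (nums : List Int) (end_ : Int) (f : Nat) (i : Int) :
    (PySem.List.pyGet? nums i).getD 0 ≤ pvS nums end_ (f + 1) i := by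
  simp only [pvS]
  split_ifs with h
  · exact le_refl _
  · exact le_add_of_nonneg_right (le_max_left 0 _)

-- ===== VERDICT (by name: the statement is the Claim_ definition above) =====
theorem middle_to_end_spec : Claim_equal_middle_to_end := by
  intro nums start end_ _ _
  unfold Spec_middle_to_end middle_to_end middle_to_end_alt
  by_cases hlt : start < end_
  · have hne : start ≠ end_ := ne_of_lt hlt
    have hge : ¬ start ≥ end_ := by omega
    rw [if_neg hne, if_neg hge]
    obtain ⟨f, hf⟩ : ∃ f, (end_ - start).toNat = f + 1 := ⟨(end_ - start).toNat - 1, by omega⟩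
    rw [foldA_eq_pvS nums end_ (f + 1) start 0 _ hlt (by omega), List.foldl_reverse]
    have hfun : (fun (x y : Int) =>
        (fun s i => (PySem.List.pyGet? nums i).getD 0 + max 0 s) y x)
        = fun (j acc : Int) => (PySem.List.pyGet? nums j).getD 0 + max 0 acc := by
      funext a b; rfl
    rw [hfun]
    rw [foldB_eq_pvS nums end_ (f + 1) start hlt (by omega)]
    have h1 := pvS_ge_head nums end_ f start
    omega
  · have hge : start ≥ end_ := by omega
    rw [if_pos hge]
    by_cases he : start = end_
    · rw [if_pos he]
    · rw [if_neg he,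
        PySem.List.pyRange_one_eq_nil (by omega : end_ ≤ start)]
      rfl
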